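-- pv_equiv track=rewrite | github.com/AmazingCodeLines/Python_Challenges | challenge19.py | check_title_consistency
-- ===== SOURCE A (Python) =====
-- def check_title_consistency(titles):
--
--     # Define predefined format checks
--     def is_uppercase(title):
--         return title.isupper()
--
--     def is_lowercase(title):
--         return title.islower()
--
--     def is_capitalized(title):
--         return title == title.capitalize()
--
--     def is_title_case(title):
--         return title == title.title()
--
--     # Mapping format names to their checking functions
--     formats = {
--         "Uppercase": is_uppercase,
--         "Lowercase": is_lowercase,
--         "Capitalized": is_capitalized,
--         "Title Case": is_title_case,
--     }
--
--     # Check which formats the titles conform to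
--     matching_formats = {format_name: all(check(title) for title in titles) for format_name, check in formats.items()}
--
--     # Filter formats where all titles match
--     matched_formats = [format_name for format_name, matches in matching_formats.items() if matches]
--
--     # Determine result
--     if len(matched_formats) == 1:
--         return matched_formats[0]
--     return "Inconsistent Formatting"
-- ===== SOURCE B (Python) =====
-- def check_title_consistency(titles):
--     # Single pass over titles narrowing a candidate list, with an early break.
--     candidates = [
--         ("Uppercase", str.isupper),
--         ("Lowercase", str.islower),
--         ("Capitalized", lambda t: t == t.capitalize()),
--         ("Title Case", lambda t: t == t.title()),
--     ]
--     for t in titles: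
--         candidates = [(n, p) for (n, p) in candidates if p(t)]
--         if not candidates:
--             break
--     if len(candidates) == 1:
--         return candidates[0][0]
--     return "Inconsistent Formatting"
-- ===== Notes on version B (the rewrite author's own statement) =====
-- stated objective: alternative
-- what changed: One outer pass over the titles narrowing a candidate-format list (with early break when no candidate survives), instead of four independent all() scans over the titles.
import Mathlib
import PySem

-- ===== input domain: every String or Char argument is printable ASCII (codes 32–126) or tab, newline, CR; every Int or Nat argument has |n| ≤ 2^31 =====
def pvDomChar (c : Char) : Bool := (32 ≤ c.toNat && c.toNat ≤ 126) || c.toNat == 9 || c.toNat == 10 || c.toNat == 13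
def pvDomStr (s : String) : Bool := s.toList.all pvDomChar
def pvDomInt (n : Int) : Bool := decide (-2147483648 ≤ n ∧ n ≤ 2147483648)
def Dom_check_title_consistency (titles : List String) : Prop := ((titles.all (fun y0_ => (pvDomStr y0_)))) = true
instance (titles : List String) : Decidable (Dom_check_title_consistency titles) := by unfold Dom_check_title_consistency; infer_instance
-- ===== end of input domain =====

-- B replaces A's four independent all() scans by one pass over the titles narrowing a candidate-format list (alternative decomposition).


-- ===== PORT A =====
-- Python str.isupper(): at least one cased char and no lowercase one (exact on the ASCII domain, where cased = alphabetic)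
def pyIsupper (s : String) : Bool :=
  (s.toList.any (fun c => PySem.Chars.isalpha c)) && (s.toList.all (fun c => !(PySem.Chars.islower c)))

-- Python str.islower(): at least one cased char and no uppercase one (exact on the ASCII domain)
def pyIslower (s : String) : Bool :=
  (s.toList.any (fun c => PySem.Chars.isalpha c)) && (s.toList.all (fun c => !(PySem.Chars.isupper c)))

-- Python str.capitalize(): first char uppercased, the rest lowercased (exact on the ASCII domain)
def pyCapitalize (s : String) : String :=
  match s.toList with
  | [] => ""
  | c :: rest => String.ofList (PySem.Chars.upperChar c :: rest.map PySem.Chars.lowerChar)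

-- Python str.title(): a letter after a non-letter is uppercased, other letters lowercased (exact on ASCII)
def pyTitleGo : Bool → List Char → List Char
  | _, [] => []
  | prev, c :: rest =>
    (if PySem.Chars.isalpha c then
        (if prev then PySem.Chars.lowerChar c else PySem.Chars.upperChar c)
      else c) :: pyTitleGo (PySem.Chars.isalpha c) rest

def pyTitle (s : String) : String := String.ofList (pyTitleGo false s.toList)

def check_title_consistency (titles : List String) : String :=
  let formats : List (String × (String → Bool)) :=
    [("Uppercase", pyIsupper), ("Lowercase", pyIslower),
     ("Capitalized", fun t => t == pyCapitalize t), ("Title Case", fun t => t == pyTitle t)]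
  let matching_formats := formats.map (fun p => (p.1, titles.all (fun t => p.2 t)))
  let matched_formats := (matching_formats.filter (fun p => p.2)).map (·.1)
  match matched_formats with
  | [x] => x
  | _ => "Inconsistent Formatting"

-- ===== PORT B =====
def predOf (name : String) (t : String) : Bool :=
  if name == "Uppercase" then pyIsupper t
  else if name == "Lowercase" then pyIslower t
  else if name == "Capitalized" then t == pyCapitalize t
  else t == pyTitle t

def narrow (cands : List String) (ts : List String) : List String :=
  match ts with
  | [] => cands
  | t :: rest =>
    let c' := cands.filter (fun f => predOf f t)
    if c'.isEmpty then c' else narrow c' rest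

def check_title_consistency_alt (titles : List String) : String :=
  let cands := narrow ["Uppercase", "Lowercase", "Capitalized", "Title Case"] titles
  if cands.length == 1 then cands.headD "Inconsistent Formatting" else "Inconsistent Formatting"

-- ===== PRECONDITION & SPEC =====
def Spec_check_title_consistency (titles : List String) (out : String) : Prop := out = check_title_consistency_alt titles
instance (titles : List String) (out : String) : Decidable (Spec_check_title_consistency titles out) := by unfold Spec_check_title_consistency; infer_instance

-- ===== CLAIM (what is proved, stated in full; the proofs are below) =====
def Claim_equal_check_title_consistency : Prop := ∀ (titles : List String), Dom_check_title_consistency titles → Spec_check_title_consistency titles (check_title_consistency titles)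

-- ===== LEMMAS AND PROOFS =====
theorem narrow_eq (ts : List String) : ∀ (cands : List String),
    narrow cands ts = cands.filter (fun f => ts.all (fun t => predOf f t)) := by
  induction ts with
  | nil => intro cands; simp [narrow]
  | cons t rest ih =>
    intro cands
    simp only [narrow]
    by_cases h : (cands.filter (fun f => predOf f t)).isEmpty
    · rw [if_pos h]
      rw [List.isEmpty_iff] at h
      have : cands.filter (fun f => (t :: rest).all (fun u => predOf f u))
          = (cands.filter (fun f => predOf f t)).filter (fun f => rest.all (fun u => predOf f u)) := by
        rw [List.filter_filter]
        apply List.filter_congr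
        intro x _
        simp [List.all_cons, Bool.and_comm]
      rw [this, h]
      simp
    · rw [if_neg h, ih]
      rw [List.filter_filter]
      apply List.filter_congr
      intro x _
      simp [List.all_cons, Bool.and_comm]

-- ===== VERDICT (by name: the statement is the Claim_ definition above) =====
theorem check_title_consistency_spec : Claim_equal_check_title_consistency := by
  intro titles _
  unfold Spec_check_title_consistency check_title_consistency check_title_consistency_alt
  rw [narrow_eq]
  have h1 : (fun t => predOf "Uppercase" t) = (fun t => pyIsupper t) := rfl
  have h2 : (fun t => predOf "Lowercase" t) = (fun t => pyIslower t) := rfl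
  have h3 : (fun t => predOf "Capitalized" t) = (fun t => t == pyCapitalize t) := rfl
  have h4 : (fun t => predOf "Title Case" t) = (fun t => t == pyTitle t) := rfl
  simp only [List.filter_cons, List.filter_nil, List.map_cons, List.map_nil,
    h1, h2, h3, h4]
  generalize titles.all (fun t => pyIsupper t) = b1
  generalize titles.all (fun t => pyIslower t) = b2
  generalize titles.all (fun t => t == pyCapitalize t) = b3
  generalize titles.all (fun t => t == pyTitle t) = b4
  cases b1 <;> cases b2 <;> cases b3 <;> cases b4 <;> rfl
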